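-- pv_equiv track=rewrite | github.com/alejotherrera/AED | Practica Final/P3/modulos3.py | analisis_cadena
-- ===== SOURCE A (Python) =====
-- def analisis_cadena(cadena):
--     hay_m = hay_mi = False
--     pal_mi = 0
--     for i in cadena:
--         if i == " " or i == ".":
--             if hay_mi:
--                 pal_mi += 1
--             hay_mi = hay_m = False
--         else:
--             if i == "m" or i == "M":
--                 hay_m = True
--             elif hay_m and i == "i":
--                 hay_mi = True
--             else:
--                 hay_m = False
--     return pal_mi
-- ===== SOURCE B (Python) =====
-- def analisis_cadena(cadena):
--     # Split into delimiter-terminated tokens, then count tokens containing the pattern.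
--     tokens = []
--     cur = ""
--     for ch in cadena:
--         if ch == " " or ch == ".":
--             tokens.append(cur)
--             cur = ""
--         else:
--             cur = cur + ch
--     return sum(1 for t in tokens if "mi" in t or "Mi" in t)
-- ===== Notes on version B (the rewrite author's own statement) =====
-- stated objective: alternative
-- what changed: B materializes the delimiter-terminated tokens into a list and then counts the tokens that pass a substring membership test, instead of A's one-pass two-boolean state machine.
import Mathlib
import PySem

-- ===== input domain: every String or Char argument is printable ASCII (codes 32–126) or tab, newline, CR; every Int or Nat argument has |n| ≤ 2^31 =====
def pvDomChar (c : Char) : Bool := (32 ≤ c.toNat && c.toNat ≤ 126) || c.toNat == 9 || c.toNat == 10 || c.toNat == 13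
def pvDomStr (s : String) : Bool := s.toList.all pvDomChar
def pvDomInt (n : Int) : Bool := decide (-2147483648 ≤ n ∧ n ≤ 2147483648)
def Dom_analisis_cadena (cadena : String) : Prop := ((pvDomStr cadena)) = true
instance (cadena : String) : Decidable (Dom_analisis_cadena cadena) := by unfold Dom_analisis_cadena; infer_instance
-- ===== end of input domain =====

-- B replaces A's one-pass two-boolean state machine by split-into-tokens-then-substring-count (objective: alternative, same cost).

-- ===== PORT A =====
def analisis_cadena (cadena : String) : Int :=
  (cadena.toList.foldl
    (fun (st : Bool × Bool × Int) i =>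
      if i = ' ' ∨ i = '.' then
        (false, false, if st.2.1 then st.2.2 + 1 else st.2.2)
      else if i = 'm' ∨ i = 'M' then (true, st.2.1, st.2.2)
      else if st.1 ∧ i = 'i' then (st.1, true, st.2.2)
      else (false, st.2.1, st.2.2))
    (false, false, (0 : Int))).2.2

-- ===== PORT B =====
def analisis_cadena_alt (cadena : String) : Int :=
  let p := cadena.toList.foldl
    (fun (p : List (List Char) × List Char) ch =>
      if ch = ' ' ∨ ch = '.' then (p.1 ++ [p.2], [])
      else (p.1, p.2 ++ [ch]))
    ([], [])
  ((p.1.countP (fun t => PySem.Chars.isIn ['m', 'i'] t || PySem.Chars.isIn ['M', 'i'] t) : Nat) : Int)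

-- ===== PRECONDITION & SPEC =====
def Spec_analisis_cadena (cadena : String) (out : Int) : Prop := out = analisis_cadena_alt cadena
instance (cadena : String) (out : Int) : Decidable (Spec_analisis_cadena cadena out) := by unfold Spec_analisis_cadena; infer_instance

-- ===== CLAIM (what is proved, stated in full; the proofs are below) =====
def Claim_equal_analisis_cadena : Prop := ∀ (cadena : String), Dom_analisis_cadena cadena → Spec_analisis_cadena cadena (analisis_cadena cadena)

-- ===== LEMMAS AND PROOFS =====

-- (hay_m, hay_mi) after running A's non-delimiter branch over a token prefix
def pvStepC (st : Bool × Bool) (c : Char) : Bool × Bool :=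
  if c = 'm' ∨ c = 'M' then (true, st.2)
  else if st.1 ∧ c = 'i' then (st.1, true)
  else (false, st.2)

def pvStateOf (cur : List Char) : Bool × Bool := cur.foldl pvStepC (false, false)

-- "cur ends with [mM] followed by zero or more 'i'": read on the REVERSED token
def pvEmr : List Char → Bool
  | [] => false
  | c :: r => if c = 'i' then pvEmr r else decide (c = 'm' ∨ c = 'M')

-- "cur contains [mM]i", stated on the REVERSED token
def pvP (r : List Char) : Prop := ['i', 'm'] <:+: r ∨ ['i', 'M'] <:+: r

def pvPb (r : List Char) : Bool := decide (['i', 'm'] <:+: r ∨ ['i', 'M'] <:+: r)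

lemma pvPb_eq_iff (r r' : List Char) (h : pvP r ↔ pvP r') : pvPb r = pvPb r' := by
  unfold pvPb
  rw [decide_eq_decide]
  simpa [pvP] using h

lemma pvPb_eq_true (r : List Char) (h : pvP r) : pvPb r = true := by
  unfold pvPb
  exact decide_eq_true (by simpa [pvP] using h)

def pvPred (t : List Char) : Bool :=
  PySem.Chars.isIn ['m', 'i'] t || PySem.Chars.isIn ['M', 'i'] t

lemma pvP_cons (c : Char) (r : List Char) :
    pvP (c :: r) ↔ (['i', 'm'] <+: c :: r ∨ ['i', 'M'] <+: c :: r) ∨ pvP r := by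
  unfold pvP
  rw [List.infix_cons_iff, List.infix_cons_iff]
  tauto

lemma pvPrefix_iff (x c : Char) (r : List Char) :
    ['i', x] <+: c :: r ↔ c = 'i' ∧ ∃ t, r = x :: t := by
  rw [List.cons_prefix_cons]
  constructor
  · rintro ⟨h1, h2⟩
    refine ⟨h1.symm, ?_⟩
    cases r with
    | nil => simp at h2
    | cons d t =>
      rcases List.cons_prefix_cons.mp h2 with ⟨hd, _⟩
      exact ⟨t, by rw [← hd]⟩
  · rintro ⟨h1, t, rfl⟩
    exact ⟨h1.symm, by simp⟩

lemma pvEmr_of_head (x : Char) (r : List Char) (hx : x = 'm' ∨ x = 'M')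
    (h : ∃ t, r = x :: t) : pvEmr r = true := by
  rcases h with ⟨t, rfl⟩
  rcases hx with rfl | rfl <;> simp [pvEmr]

lemma pvEmr_P (r : List Char) (h : pvEmr r = true) : pvP ('i' :: r) := by
  induction r with
  | nil => simp [pvEmr] at h
  | cons c r ih =>
    by_cases hc : c = 'i'
    · subst hc
      simp only [pvEmr] at h
      exact (pvP_cons 'i' ('i' :: r)).mpr (Or.inr (ih h))
    · simp only [pvEmr, if_neg hc, decide_eq_true_eq] at h
      refine (pvP_cons 'i' (c :: r)).mpr (Or.inl ?_)
      rcases h with rfl | rfl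
      · exact Or.inl ((pvPrefix_iff 'm' 'i' ('m' :: r)).mpr ⟨rfl, r, rfl⟩)
      · exact Or.inr ((pvPrefix_iff 'M' 'i' ('M' :: r)).mpr ⟨rfl, r, rfl⟩)

lemma pvStateOf_reverse (r : List Char) :
    pvStateOf r.reverse = (pvEmr r, pvPb r) := by
  induction r with
  | nil => simp [pvStateOf, pvPb, pvEmr]
  | cons c r ih =>
    have hfold : pvStateOf ((c :: r).reverse) = pvStepC (pvStateOf r.reverse) c := by
      simp [pvStateOf, List.foldl_append]
    rw [hfold, ih]
    by_cases hm : c = 'm' ∨ c = 'M'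
    · have hci : c ≠ 'i' := by rcases hm with rfl | rfl <;> decide
      have hP : pvP (c :: r) ↔ pvP r := by
        rw [pvP_cons]
        constructor
        · rintro (h | h)
          · exfalso
            rcases h with h | h <;>
              exact hci ((pvPrefix_iff _ c r).mp h).1
          · exact h
        · exact Or.inr
      have hemr : pvEmr (c :: r) = true := by
        rcases hm with rfl | rfl <;> simp [pvEmr]
      simp [pvStepC, if_pos hm, hemr, pvPb_eq_iff _ _ hP]
    · by_cases hi : c = 'i'
      · subst hi
        by_cases he : pvEmr r = true
        · have hP : pvP ('i' :: r) := pvEmr_P r he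
          simp [pvStepC, he, pvEmr, pvPb_eq_true _ hP]
        · have he' : pvEmr r = false := by simpa using he
          have hP : pvP ('i' :: r) ↔ pvP r := by
            rw [pvP_cons]
            constructor
            · rintro (h | h)
              · exfalso
                rcases h with h | h
                · have := pvEmr_of_head 'm' r (Or.inl rfl) ((pvPrefix_iff _ _ _).mp h).2
                  simp [he'] at this
                · have := pvEmr_of_head 'M' r (Or.inr rfl) ((pvPrefix_iff _ _ _).mp h).2
                  simp [he'] at this
              · exact h
            · exact Or.inr
          simp [pvStepC, he', pvEmr, pvPb_eq_iff _ _ hP]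
      · have hP : pvP (c :: r) ↔ pvP r := by
          rw [pvP_cons]
          constructor
          · rintro (h | h)
            · exfalso
              rcases h with h | h <;>
                exact hi ((pvPrefix_iff _ c r).mp h).1
            · exact h
          · exact Or.inr
        have hemr : pvEmr (c :: r) = false := by
          simp only [pvEmr, if_neg hi, decide_eq_false_iff_not]
          exact hm
        simp [pvStepC, hm, hi, hemr, pvPb_eq_iff _ _ hP]

lemma pvPred_eq (cur : List Char) : pvPred cur = pvPb cur.reverse := by
  have e1 : (['i', 'm'] : List Char) <:+: cur.reverse ↔ ['m', 'i'] <:+: cur := by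
    conv_lhs => rw [show (['i', 'm'] : List Char) = ['m', 'i'].reverse from rfl]
    exact List.reverse_infix
  have e2 : (['i', 'M'] : List Char) <:+: cur.reverse ↔ ['M', 'i'] <:+: cur := by
    conv_lhs => rw [show (['i', 'M'] : List Char) = ['M', 'i'].reverse from rfl]
    exact List.reverse_infix
  have d1 : PySem.Chars.isIn ['m', 'i'] cur = decide (['m', 'i'] <:+: cur) := by
    cases h : PySem.Chars.isIn ['m', 'i'] cur
    · rw [PySem.Chars.isIn_eq_false_iff] at h; simp [h]
    · rw [PySem.Chars.isIn_iff_infix] at h; simp [h]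
  have d2 : PySem.Chars.isIn ['M', 'i'] cur = decide (['M', 'i'] <:+: cur) := by
    cases h : PySem.Chars.isIn ['M', 'i'] cur
    · rw [PySem.Chars.isIn_eq_false_iff] at h; simp [h]
    · rw [PySem.Chars.isIn_iff_infix] at h; simp [h]
  unfold pvPred pvPb
  rw [d1, d2]
  simp [e1, e2]

-- A's current (hay_m, hay_mi) over the pending token agrees with pvStateOf; the '.2' is the substring test
lemma pvState_snd (cur : List Char) : (pvStateOf cur).2 = pvPred cur := by
  have := pvStateOf_reverse cur.reverse
  rw [List.reverse_reverse] at this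
  rw [this, pvPred_eq]

lemma pvState_append (cur : List Char) (c : Char) :
    pvStateOf (cur ++ [c]) = pvStepC (pvStateOf cur) c := by
  simp [pvStateOf, List.foldl_append]

-- the main loop invariant: A's running count = count of matching tokens B has emitted so far
lemma pvMain (l : List Char) :
    ∀ (toks : List (List Char)) (cur : List Char) (pal : Int),
    (l.foldl
      (fun (st : Bool × Bool × Int) i =>
        if i = ' ' ∨ i = '.' then
          (false, false, if st.2.1 then st.2.2 + 1 else st.2.2)
        else if i = 'm' ∨ i = 'M' then (true, st.2.1, st.2.2)
        else if st.1 ∧ i = 'i' then (st.1, true, st.2.2)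
        else (false, st.2.1, st.2.2))
      ((pvStateOf cur).1, (pvStateOf cur).2, pal)).2.2
    = pal + (((l.foldl
        (fun (p : List (List Char) × List Char) ch =>
          if ch = ' ' ∨ ch = '.' then (p.1 ++ [p.2], [])
          else (p.1, p.2 ++ [ch]))
        (toks, cur)).1.countP pvPred : Nat) : Int)
      - ((toks.countP pvPred : Nat) : Int) := by
  induction l with
  | nil => intro toks cur pal; simp
  | cons c l ih =>
    intro toks cur pal
    by_cases hd : c = ' ' ∨ c = '.'
    · simp only [List.foldl_cons, if_pos hd]
      have h0 : pvStateOf ([] : List Char) = (false, false) := by simp [pvStateOf]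
      have key := ih (toks ++ [cur]) [] (if (pvStateOf cur).2 then pal + 1 else pal)
      rw [h0] at key
      rw [key, pvState_snd cur, List.countP_append]
      by_cases hp : pvPred cur = true
      · simp [hp]
        ring
      · have hp' : pvPred cur = false := by simpa using hp
        simp [hp']
    · simp only [List.foldl_cons, if_neg hd]
      have key := ih toks (cur ++ [c]) pal
      rw [pvState_append cur c] at key
      unfold pvStepC at key
      by_cases hm : c = 'm' ∨ c = 'M'
      · rw [if_pos hm] at key
        simpa [if_pos hm] using key
      · by_cases hmi : (pvStateOf cur).1 = true ∧ c = 'i'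
        · rw [if_neg hm, if_pos hmi] at key
          simpa [if_neg hm, if_pos hmi] using key
        · rw [if_neg hm, if_neg hmi] at key
          simpa [if_neg hm, if_neg hmi] using key

-- ===== VERDICT (by name: the statement is the Claim_ definition above) =====
theorem analisis_cadena_spec : Claim_equal_analisis_cadena := by
  intro cadena _
  unfold Spec_analisis_cadena analisis_cadena analisis_cadena_alt
  have h0 : pvStateOf ([] : List Char) = (false, false) := by simp [pvStateOf]
  have := pvMain cadena.toList [] [] 0
  rw [h0] at this
  simpa [pvPred] using this
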